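-- pv_equiv track=rewrite | github.com/cherry-ni/study-algoexpert | Recursion/Medium/staircase-traversal.py | staircaseTraversalRecursion
-- ===== SOURCE A (Python) =====
-- def staircaseTraversalRecursion(currentHeight, height, maxSteps, cnt):
--     if currentHeight == height:
--         return cnt + 1
--
--     for s in range(1, maxSteps + 1):
--         if currentHeight + s > height:
--             continue
--
--         cnt = staircaseTraversalRecursion(currentHeight + s, height, maxSteps, cnt)
--
--     return cnt
-- ===== SOURCE B (Python) =====
-- def staircaseTraversalRecursion(currentHeight, height, maxSteps, cnt):
--     d = height - currentHeight
--     if d < 0: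
--         return cnt
--     if maxSteps <= 0:
--         return cnt + (1 if d == 0 else 0)
--     ways = [1]
--     window = 0
--     for i in range(1, d + 1):
--         window += ways[i - 1]
--         if i - 1 - maxSteps >= 0:
--             window -= ways[i - 1 - maxSteps]
--         ways.append(window)
--     return cnt + ways[d]
-- ===== Notes on version B (the rewrite author's own statement) =====
-- stated objective: alternative
-- what changed: Replaces A's recursion enumerating every step sequence by a bottom-up DP table over heights maintained with a sliding-window sum of the previous maxSteps entries.
import Mathlib
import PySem

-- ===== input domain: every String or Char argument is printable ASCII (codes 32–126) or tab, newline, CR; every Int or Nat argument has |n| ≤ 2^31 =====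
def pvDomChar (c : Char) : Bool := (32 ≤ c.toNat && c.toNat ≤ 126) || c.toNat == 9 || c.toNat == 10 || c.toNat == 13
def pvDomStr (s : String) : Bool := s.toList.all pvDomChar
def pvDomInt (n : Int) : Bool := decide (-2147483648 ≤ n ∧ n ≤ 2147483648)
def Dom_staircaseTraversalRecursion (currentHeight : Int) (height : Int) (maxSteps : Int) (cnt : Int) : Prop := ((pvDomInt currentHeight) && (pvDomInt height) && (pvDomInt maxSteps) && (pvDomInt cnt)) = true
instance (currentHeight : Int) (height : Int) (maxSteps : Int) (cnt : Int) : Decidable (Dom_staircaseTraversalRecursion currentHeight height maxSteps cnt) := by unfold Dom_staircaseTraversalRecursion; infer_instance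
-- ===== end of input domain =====

-- B replaces A's recursive enumeration of all step sequences by a bottom-up
-- sliding-window DP over heights; equal return values proved below (inside Pre_).

-- ===== PORT A =====
-- A's 'for s in range(1, maxSteps+1)' is ported as recursion over the remaining
-- iteration count (remaining = maxSteps.toNat at the call), with s = i + 1.
mutual
def staircaseTraversalRecursion (currentHeight : Int) (height : Int) (maxSteps : Int) (cnt : Int) : Int :=
  if currentHeight = height then cnt + 1
  else stLoop currentHeight height maxSteps cnt 0 maxSteps.toNat
termination_by ((height - currentHeight).toNat, 1, 0)

def stLoop (currentHeight : Int) (height : Int) (maxSteps : Int) (cnt : Int) (i : Nat) (remaining : Nat) : Int :=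
  match remaining with
  | 0 => cnt
  | r + 1 =>
    -- s = i + 1 (the loop variable of 'for s in range(1, maxSteps+1)')
    let cnt' := if _hguard : currentHeight + ((i : Int) + 1) > height then cnt
                else staircaseTraversalRecursion (currentHeight + ((i : Int) + 1)) height maxSteps cnt
    stLoop currentHeight height maxSteps cnt' (i + 1) r
termination_by ((height - currentHeight).toNat, 0, remaining)
decreasing_by
  · simp only [Prod.lex_def]; omega
  · simp only [Prod.lex_def]
    exact Or.inr ⟨trivial, Or.inr ⟨trivial, Nat.lt_succ_self r⟩⟩
end

-- ===== PORT B =====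
-- loop body of B; indices i-1 and i-1-k are always in range in B, so the pyGetD default 0 is never used
def altStep (k : Int) (st : List Int × Int) (i : Int) : List Int × Int :=
  let window := st.2 + PySem.List.pyGetD st.1 (i - 1) 0
  let window := if i - 1 - k ≥ 0 then window - PySem.List.pyGetD st.1 (i - 1 - k) 0 else window
  (st.1 ++ [window], window)

def staircaseTraversalRecursion_alt (currentHeight : Int) (height : Int) (maxSteps : Int) (cnt : Int) : Int :=
  let d := height - currentHeight
  if d < 0 then cnt
  else if maxSteps ≤ 0 then cnt + (if d = 0 then 1 else 0)
  else
    let st := (PySem.List.pyRange 1 (d + 1) 1).foldl (altStep maxSteps) ([1], 0)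
    cnt + PySem.List.pyGetD st.1 d 0

-- ===== PRECONDITION & SPEC =====
-- Pre_ excludes exactly the inputs on which Python A raises RecursionError: with maxSteps ≥ 1 it
-- recurses to depth height - currentHeight, so heights ≥ CPython's default recursion limit (1000) raise.
def Pre_staircaseTraversalRecursion (currentHeight : Int) (height : Int) (maxSteps : Int) (cnt : Int) : Prop :=
  maxSteps ≤ 0 ∨ height - currentHeight < 1000
instance (currentHeight : Int) (height : Int) (maxSteps : Int) (cnt : Int) : Decidable (Pre_staircaseTraversalRecursion currentHeight height maxSteps cnt) := by unfold Pre_staircaseTraversalRecursion; infer_instance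
def pvWitness_staircaseTraversalRecursion : Int × Int × Int × Int := (0, 10, 2, 0)

def Spec_staircaseTraversalRecursion (currentHeight : Int) (height : Int) (maxSteps : Int) (cnt : Int) (out : Int) : Prop := out = staircaseTraversalRecursion_alt currentHeight height maxSteps cnt
instance (currentHeight : Int) (height : Int) (maxSteps : Int) (cnt : Int) (out : Int) : Decidable (Spec_staircaseTraversalRecursion currentHeight height maxSteps cnt out) := by unfold Spec_staircaseTraversalRecursion; infer_instance

-- ===== CLAIM (what is proved, stated in full; the proofs are below) =====
def Claim_equal_staircaseTraversalRecursion : Prop := ∀ (currentHeight : Int) (height : Int) (maxSteps : Int) (cnt : Int), Dom_staircaseTraversalRecursion currentHeight height maxSteps cnt → Pre_staircaseTraversalRecursion currentHeight height maxSteps cnt → Spec_staircaseTraversalRecursion currentHeight height maxSteps cnt (staircaseTraversalRecursion currentHeight height maxSteps cnt)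
-- ===== LEMMAS AND PROOFS =====

-- number of ways to climb n steps with step sizes 1..k (the sum runs over step sizes s = j+1)
def specW (k : Nat) : Nat → Int
  | 0 => 1
  | n + 1 => ((List.range k).map (fun j => if j + 1 ≤ n + 1 then specW k (n - j) else 0)).sum
decreasing_by omega

-- A's return value minus cnt, as a function of the remaining height
def Gfun (ms d : Int) : Int := if d < 0 then 0 else specW ms.toNat d.toNat

-- the sliding-window sum: sum of specW over the up-to-kN indices below m
def Tsum (kN m : Nat) : Int :=
  ((List.range kN).map (fun j => if j + 1 ≤ m then specW kN (m - (j + 1)) else 0)).sum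

theorem list_sum_range (f : Nat → Int) (n : Nat) :
    ((List.range n).map f).sum = ∑ j ∈ Finset.range n, f j := by
  induction n with
  | zero => simp
  | succ n ih => rw [List.range_succ]; simp [Finset.sum_range_succ, ih]

theorem specW_succ (kN m : Nat) : specW kN (m + 1) = Tsum kN (m + 1) := by
  rw [specW, Tsum]
  congr 1
  apply List.map_congr_left
  intro j _
  simp [Nat.succ_sub_succ]

theorem Tsum_zero (kN : Nat) : Tsum kN 0 = 0 := by simp [Tsum]

theorem Tsum_succ (kN m : Nat) :
    Tsum kN (m + 1) = Tsum kN m + specW kN m - (if kN ≤ m then specW kN (m - kN) else 0) := by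
  have h1 : Tsum kN (m + 1) =
      ∑ j ∈ Finset.range kN, (fun j => if j ≤ m then specW kN (m - j) else 0) j := by
    rw [Tsum, list_sum_range]
    refine Finset.sum_congr rfl fun j _ => ?_
    by_cases hjm : j ≤ m <;> simp [hjm, Nat.succ_sub_succ]
  have h2 : Tsum kN m =
      ∑ j ∈ Finset.range kN, (fun j => if j ≤ m then specW kN (m - j) else 0) (j + 1) := by
    rw [Tsum, list_sum_range]
  have h3 := Finset.sum_range_sub' (fun j => if j ≤ m then specW kN (m - j) else 0) kN
  rw [Finset.sum_sub_distrib] at h3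
  simp only at h1 h2 h3
  rw [h1, h2]
  simp only [Nat.zero_le, if_true, Nat.sub_zero] at h3
  omega

-- ---------- A side ----------

theorem stLoop_skip (ch h ms cnt : Int) (i r : Nat) (hch : h < ch) :
    stLoop ch h ms cnt i r = cnt := by
  induction r generalizing cnt i with
  | zero => rw [stLoop]
  | succ r ih =>
    rw [stLoop]
    simp only [dif_pos (show ch + ((i : Int) + 1) > h by omega)]
    exact ih cnt (i + 1)

theorem stLoop_sum (h ms ch : Int) (_hch : ch < h)
    (IH : ∀ (cnt s : Int), 1 ≤ s → ch + s ≤ h →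
      staircaseTraversalRecursion (ch + s) h ms cnt = cnt + Gfun ms (h - (ch + s)))
    (r : Nat) : ∀ (i : Nat) (cnt : Int), stLoop ch h ms cnt i r =
      cnt + ((List.range r).map (fun (j : Nat) =>
        if ch + ((i : Int) + (j : Int) + 1) > h then 0
        else Gfun ms (h - (ch + ((i : Int) + (j : Int) + 1))))).sum := by
  induction r with
  | zero => intro i cnt; rw [stLoop]; simp
  | succ r ih =>
    intro i cnt
    rw [stLoop]
    rw [ih]
    have hstep : (if _hguard : ch + ((i : Int) + 1) > h then cnt
        else staircaseTraversalRecursion (ch + ((i : Int) + 1)) h ms cnt)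
        = cnt + (if ch + ((i : Int) + (0 : Int) + 1) > h then 0
                 else Gfun ms (h - (ch + ((i : Int) + (0 : Int) + 1)))) := by
      by_cases hg : ch + ((i : Int) + 1) > h
      · rw [dif_pos hg, if_pos (by omega)]; ring
      · rw [dif_neg hg, if_neg (by omega)]
        rw [IH cnt ((i : Int) + 1) (by omega) (by omega)]
        norm_num
    rw [hstep]
    rw [List.range_succ_eq_map, List.map_cons, List.map_map, List.sum_cons]
    have hmap : (List.range r).map ((fun (j : Nat) =>
          if ch + ((i : Int) + (j : Int) + 1) > h then 0
          else Gfun ms (h - (ch + ((i : Int) + (j : Int) + 1)))) ∘ Nat.succ)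
        = (List.range r).map (fun (j : Nat) =>
          if ch + (((i + 1 : Nat) : Int) + (j : Int) + 1) > h then 0
          else Gfun ms (h - (ch + (((i + 1 : Nat) : Int) + (j : Int) + 1)))) := by
      apply List.map_congr_left
      intro j _
      simp only [Function.comp]
      have : ch + ((i : Int) + ((j + 1 : Nat) : Int) + 1) = ch + (((i + 1 : Nat) : Int) + (j : Int) + 1) := by
        push_cast; ring
      rw [show ((Nat.succ j : Nat) : Int) = ((j + 1 : Nat) : Int) from rfl, this]
    rw [hmap]
    push_cast
    ring

theorem A_eq_aux : ∀ (n : Nat) (ch h ms cnt : Int), (h - ch).toNat ≤ n →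
    staircaseTraversalRecursion ch h ms cnt = cnt + Gfun ms (h - ch) := by
  intro n
  induction n with
  | zero =>
    intro ch h ms cnt hn
    rw [staircaseTraversalRecursion]
    by_cases hch : ch = h
    · rw [if_pos hch]
      have : h - ch = 0 := by omega
      simp [this, Gfun, specW]
    · rw [if_neg hch]
      have hlt : h < ch := by omega
      rw [stLoop_skip ch h ms cnt 0 ms.toNat hlt]
      have : h - ch < 0 := by omega
      simp [Gfun, this]
  | succ n ihn =>
    intro ch h ms cnt hn
    rw [staircaseTraversalRecursion]
    by_cases hch : ch = h
    · rw [if_pos hch]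
      have : h - ch = 0 := by omega
      simp [this, Gfun, specW]
    rw [if_neg hch]
    by_cases hlt : h < ch
    · rw [stLoop_skip ch h ms cnt 0 ms.toNat hlt]
      have : h - ch < 0 := by omega
      simp [Gfun, this]
    have hchlt : ch < h := by omega
    have IH : ∀ (cnt s : Int), 1 ≤ s → ch + s ≤ h →
        staircaseTraversalRecursion (ch + s) h ms cnt = cnt + Gfun ms (h - (ch + s)) := by
      intro cnt s hs hle
      exact ihn (ch + s) h ms cnt (by omega)
    rw [stLoop_sum h ms ch hchlt IH ms.toNat 0 cnt]
    congr 1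
    obtain ⟨m, hm⟩ : ∃ m, (h - ch).toNat = m + 1 := ⟨(h - ch).toNat - 1, by omega⟩
    have hd : h - ch = (m : Int) + 1 := by omega
    have hG : Gfun ms (h - ch) = specW ms.toNat (m + 1) := by
      rw [Gfun, if_neg (by omega), hm]
    rw [hG, specW_succ, Tsum]
    congr 1
    apply List.map_congr_left
    intro j _
    simp only [Nat.cast_zero, zero_add]
    by_cases hj : j + 1 ≤ m + 1
    · rw [if_neg (show ¬ ch + ((j : Int) + 1) > h by omega), if_pos hj]
      rw [Gfun, if_neg (by omega)]
      congr 1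
      omega
    · rw [if_pos (show ch + ((j : Int) + 1) > h by omega), if_neg hj]

-- ---------- B side ----------

theorem getD_map_range_spec (f : Nat → Int) (n k : Nat) (hk : k < n) :
    ((List.range n).map f).getD k 0 = f k := by
  rw [List.getD_eq_getElem?_getD]
  simp [hk]

theorem fold_inv (kN : Nat) (m : Nat) :
    (PySem.List.pyRange 1 ((m : Int) + 1) 1).foldl (altStep (kN : Int)) ([1], 0) =
      ((List.range (m + 1)).map (fun j => specW kN j), Tsum kN m) := by
  induction m with
  | zero =>
    rw [PySem.List.pyRange_one_eq_nil (by omega)]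
    simp [Tsum_zero, specW]
  | succ m ih =>
    rw [show ((m + 1 : Nat) : Int) + 1 = (((m : Int) + 1) + 1) by omega]
    rw [PySem.List.pyRange_one_succ_right (by omega), List.foldl_append, ih]
    show altStep _ _ _ = _
    simp only [altStep]
    have e1 : (m : Int) + 1 - 1 = ((m : Nat) : Int) := by omega
    have g1 : PySem.List.pyGetD ((List.range (m + 1)).map (fun j => specW kN j)) ((m : Int) + 1 - 1) 0
        = specW kN m := by
      rw [e1, PySem.List.pyGetD_natCast]
      exact getD_map_range_spec _ _ _ (by omega)
    rw [g1]
    by_cases hk : kN ≤ m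
    · rw [if_pos (show (m : Int) + 1 - 1 - (kN : Int) ≥ 0 by omega)]
      have e2 : (m : Int) + 1 - 1 - (kN : Int) = ((m - kN : Nat) : Int) := by
        push_cast [hk]; ring
      rw [e2, PySem.List.pyGetD_natCast]
      rw [getD_map_range_spec _ _ _ (by omega)]
      have hw : Tsum kN m + specW kN m - specW kN (m - kN) = Tsum kN (m + 1) := by
        rw [Tsum_succ, if_pos hk]
      have hlist : (List.range (m + 1 + 1)).map (fun j => specW kN j)
          = (List.range (m + 1)).map (fun j => specW kN j) ++ [Tsum kN (m + 1)] := by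
        rw [List.range_succ, List.map_append, List.map_singleton, specW_succ]
      rw [hw, hlist]
    · rw [if_neg (show ¬ (m : Int) + 1 - 1 - (kN : Int) ≥ 0 by omega)]
      have hw : Tsum kN m + specW kN m = Tsum kN (m + 1) := by
        rw [Tsum_succ, if_neg hk]; ring
      have hlist : (List.range (m + 1 + 1)).map (fun j => specW kN j)
          = (List.range (m + 1)).map (fun j => specW kN j) ++ [Tsum kN (m + 1)] := by
        rw [List.range_succ, List.map_append, List.map_singleton, specW_succ]
      rw [hw, hlist]

theorem alt_eq (ch h ms cnt : Int) :
    staircaseTraversalRecursion_alt ch h ms cnt = cnt + Gfun ms (h - ch) := by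
  rw [staircaseTraversalRecursion_alt]
  simp only []
  by_cases hd : h - ch < 0
  · rw [if_pos hd, Gfun, if_pos hd]; ring
  rw [if_neg hd]
  by_cases hms : ms ≤ 0
  · rw [if_pos hms, Gfun, if_neg hd]
    have h0 : ms.toNat = 0 := by omega
    by_cases hz : h - ch = 0
    · rw [if_pos hz, hz, h0]
      simp [specW]
    · rw [if_neg hz, h0]
      obtain ⟨m, hm⟩ : ∃ m : Nat, (h - ch).toNat = m + 1 := ⟨(h - ch).toNat - 1, by omega⟩
      rw [hm, specW]
      simp
  rw [if_neg hms]
  have hk : ms = ((ms.toNat : Nat) : Int) := by omega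
  rw [hk]
  obtain ⟨m, hm⟩ : ∃ m : Nat, h - ch = (m : Int) := ⟨(h - ch).toNat, by omega⟩
  rw [hm, fold_inv]
  simp only []
  rw [PySem.List.pyGetD_natCast]
  rw [getD_map_range_spec _ _ _ (by omega)]
  rw [Gfun, if_neg (by omega)]
  simp
  congr 1
  omega

-- ===== VERDICT (by name: the statement is the Claim_ definition above) =====
theorem staircaseTraversalRecursion_spec : Claim_equal_staircaseTraversalRecursion := by
  intro ch h ms cnt _ _
  unfold Spec_staircaseTraversalRecursion
  rw [A_eq_aux (h - ch).toNat ch h ms cnt le_rfl, alt_eq]
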